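-- pv_equiv track=rewrite | github.com/DannyJung23/Coin-Detector | coin_detection_v1.py | computeDilation5x5CircularSE
-- ===== SOURCE A (Python) =====
-- def createInitializedGreyscalePixelArray(image_width, image_height, initValue = 0):
--     new_pixel_array = []
--     for _ in range(image_height):
--         new_row = []
--         for _ in range(image_width):
--             new_row.append(initValue)
--         new_pixel_array.append(new_row)
--
--     return new_pixel_array
--
-- def computeDilation5x5CircularSE(pixel_array, image_width, image_height):
--
--     dilated_pixel_array = createInitializedGreyscalePixelArray(image_width, image_height)
--
--     # 5x5 Circular SE
--     kernel = [[0, 0, 1, 0, 0],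
--               [0, 1, 1, 1, 0],
--               [1, 1, 1, 1, 1],
--               [0, 1, 1, 1, 0],
--               [0, 0, 1, 0, 0]]
--
--     # BorderZeroPadding 5x5
--     for i in range(image_height):
--         pixel_array[i].append(0)
--         pixel_array[i].append(0)
--         pixel_array[i].insert(0, 0)
--         pixel_array[i].insert(0, 0)
--     pixel_array.append([0] * (image_width + 4))
--     pixel_array.append([0] * (image_width + 4))
--     pixel_array.insert(0, ([0] * (image_width + 4)))
--     pixel_array.insert(0, ([0] * (image_width + 4)))
--
--     # Hit check with 5x5 Circular SE
--     for i in range(2, image_height+2):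
--         for j in range(2, image_width+2):
--
--             dilated_value = 0
--             for k in range(-2, 3):
--                 for l in range(-2, 3):
--
--                     if pixel_array[i+k][j+l] > 0 and kernel[k+2][l+2] == 1:
--                         dilated_value = 255
--
--             dilated_pixel_array[i-2][j-2] = dilated_value
--
--     return dilated_pixel_array
-- ===== SOURCE B (Python) =====
-- def computeDilation5x5CircularSE(pixel_array, image_width, image_height):
--     # identical in-place zero padding (callers observe this mutation of pixel_array)
--     for i in range(image_height):
--         pixel_array[i].append(0)
--         pixel_array[i].append(0)
--         pixel_array[i].insert(0, 0)
--         pixel_array[i].insert(0, 0)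
--     pixel_array.append([0] * (image_width + 4))
--     pixel_array.append([0] * (image_width + 4))
--     pixel_array.insert(0, [0] * (image_width + 4))
--     pixel_array.insert(0, [0] * (image_width + 4))
--
--     dilated_pixel_array = [[0] * image_width for _ in range(image_height)]
--
--     # the 13 offsets where the 5x5 circular kernel is 1 (a |dk|+|dl| <= 2 diamond)
--     offsets = [(dk, dl) for dk in range(-2, 3) for dl in range(-2, 3)
--                if abs(dk) + abs(dl) <= 2]
--
--     # scatter: every foreground padded pixel lights up its whole neighbourhood
--     for p in range(2, image_height + 2):
--         for q in range(2, image_width + 2):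
--             if pixel_array[p][q] > 0:
--                 for dk, dl in offsets:
--                     r = p - dk - 2
--                     c = q - dl - 2
--                     if 0 <= r < image_height and 0 <= c < image_width:
--                         dilated_pixel_array[r][c] = 255
--     return dilated_pixel_array
-- ===== Notes on version B (the rewrite author's own statement) =====
-- stated objective: alternative
-- what changed: Replaces A's per-output gather (for every output pixel, scan the whole 5x5 kernel) by a per-foreground-pixel scatter over the precomputed 13 active diamond offsets, skipping background pixels entirely; the in-place border padding of pixel_array is kept identical.
-- outside the precondition, e.g. on computeDilation5x5CircularSE([[0, 0, 255]], 1, 1): A returns [[255]], B returns [[0]]; on computeDilation5x5CircularSE([], 0, 1): A raises IndexError, B raises IndexError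
import Mathlib
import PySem

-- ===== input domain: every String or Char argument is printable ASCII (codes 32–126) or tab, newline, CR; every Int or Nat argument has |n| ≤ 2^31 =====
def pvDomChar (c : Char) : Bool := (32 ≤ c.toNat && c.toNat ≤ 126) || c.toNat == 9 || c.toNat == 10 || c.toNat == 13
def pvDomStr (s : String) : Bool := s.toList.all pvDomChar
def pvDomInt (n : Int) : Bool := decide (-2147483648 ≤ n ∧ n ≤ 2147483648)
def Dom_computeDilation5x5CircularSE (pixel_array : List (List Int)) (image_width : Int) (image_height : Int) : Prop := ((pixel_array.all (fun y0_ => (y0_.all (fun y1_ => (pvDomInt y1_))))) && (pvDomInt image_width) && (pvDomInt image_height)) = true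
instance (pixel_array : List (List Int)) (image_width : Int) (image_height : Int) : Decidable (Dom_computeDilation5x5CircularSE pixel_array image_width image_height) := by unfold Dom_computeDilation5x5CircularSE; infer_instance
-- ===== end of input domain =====

-- B replaces A's per-output 5x5 gather scan by a per-foreground-pixel scatter over the 13
-- active diamond offsets (objective: alternative).  Both Pythons perform the SAME in-place
-- border padding of pixel_array; the equivalence proved here is about the return value.

-- ===== PORT A =====
-- [0] * (image_width + 4)
def pvZeroRow (image_width : Int) : List Int := List.replicate (image_width + 4).toNat 0

-- the BorderZeroPadding 5x5 block, shared verbatim by A and B (Source B keeps it identical)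
def pvPad (pixel_array : List (List Int)) (image_width : Int) (image_height : Int) : List (List Int) :=
  let pa1 := (PySem.List.pyRange 0 image_height 1).foldl (fun pa i =>
    let pa := PySem.List.pySetD pa i ((PySem.List.pyGetD pa i []) ++ [0])                 -- pixel_array[i].append(0)
    let pa := PySem.List.pySetD pa i ((PySem.List.pyGetD pa i []) ++ [0])                 -- pixel_array[i].append(0)
    let pa := PySem.List.pySetD pa i (PySem.List.insert (PySem.List.pyGetD pa i []) 0 0)  -- pixel_array[i].insert(0, 0)
    PySem.List.pySetD pa i (PySem.List.insert (PySem.List.pyGetD pa i []) 0 0)) pixel_array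
  let pa2 := pa1 ++ [pvZeroRow image_width]
  let pa3 := pa2 ++ [pvZeroRow image_width]
  let pa4 := PySem.List.insert pa3 0 (pvZeroRow image_width)
  PySem.List.insert pa4 0 (pvZeroRow image_width)

def pvKernel : List (List Int) :=
  [[0, 0, 1, 0, 0],
   [0, 1, 1, 1, 0],
   [1, 1, 1, 1, 1],
   [0, 1, 1, 1, 0],
   [0, 0, 1, 0, 0]]

def computeDilation5x5CircularSE (pixel_array : List (List Int)) (image_width : Int) (image_height : Int) : List (List Int) :=
  -- createInitializedGreyscalePixelArray(image_width, image_height)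
  let dilated : List (List Int) := (PySem.List.pyRange 0 image_height 1).foldl (fun acc _ =>
      acc ++ [(PySem.List.pyRange 0 image_width 1).foldl (fun row _ => row ++ [(0 : Int)]) []]) []
  let padded := pvPad pixel_array image_width image_height
  -- Hit check with 5x5 Circular SE
  (PySem.List.pyRange 2 (image_height + 2) 1).foldl (fun D i =>
    (PySem.List.pyRange 2 (image_width + 2) 1).foldl (fun D j =>
      let v := (PySem.List.pyRange (-2) 3 1).foldl (fun v k =>
        (PySem.List.pyRange (-2) 3 1).foldl (fun v l =>
          if 0 < PySem.List.pyGetD (PySem.List.pyGetD padded (i + k) []) (j + l) 0 ∧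
             PySem.List.pyGetD (PySem.List.pyGetD pvKernel (k + 2) []) (l + 2) 0 = 1
          then 255 else v) v) 0
      PySem.List.pySetD D (i - 2) (PySem.List.pySetD (PySem.List.pyGetD D (i - 2) []) (j - 2) v)) D) dilated

-- ===== PORT B =====
-- the 13 offsets where the circular kernel is 1
def pvOffsets : List (Int × Int) :=
  (PySem.List.pyRange (-2) 3 1).flatMap (fun dk =>
    ((PySem.List.pyRange (-2) 3 1).filter (fun dl => decide (dk.natAbs + dl.natAbs ≤ 2))).map (fun dl => (dk, dl)))

def computeDilation5x5CircularSE_alt (pixel_array : List (List Int)) (image_width : Int) (image_height : Int) : List (List Int) :=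
  let padded := pvPad pixel_array image_width image_height
  let dilated : List (List Int) := (PySem.List.pyRange 0 image_height 1).map (fun _ => List.replicate image_width.toNat 0)
  -- scatter from each foreground padded pixel
  (PySem.List.pyRange 2 (image_height + 2) 1).foldl (fun D p =>
    (PySem.List.pyRange 2 (image_width + 2) 1).foldl (fun D q =>
      if 0 < PySem.List.pyGetD (PySem.List.pyGetD padded p []) q 0 then
        pvOffsets.foldl (fun D o =>
          let r := p - o.1 - 2
          let c := q - o.2 - 2
          if 0 ≤ r ∧ r < image_height ∧ 0 ≤ c ∧ c < image_width then
            PySem.List.pySetD D r (PySem.List.pySetD (PySem.List.pyGetD D r []) c 255)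
          else D) D
      else D) D) dilated

-- ===== PRECONDITION & SPEC =====
-- Pre_ admits every input with image_height ≤ 0 (both programs return []) and every rectangular
-- image; it excludes non-rectangular inputs with image_height > 0 (row count ≠ image_height or a
-- row length ≠ image_width), on which A either raises IndexError or reads stray out-of-bounds
-- pixels whose effect on the result is an artefact of the padding implementation.
def Pre_computeDilation5x5CircularSE (pixel_array : List (List Int)) (image_width : Int) (image_height : Int) : Prop :=
  image_height ≤ 0 ∨
    (image_height = (pixel_array.length : Int) ∧ ∀ row ∈ pixel_array, (row.length : Int) = image_width)
instance (pixel_array : List (List Int)) (image_width : Int) (image_height : Int) : Decidable (Pre_computeDilation5x5CircularSE pixel_array image_width image_height) := by unfold Pre_computeDilation5x5CircularSE; infer_instance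

def pvWitness_computeDilation5x5CircularSE : List (List Int) × Int × Int := ([[255, 0], [0, 0]], 2, 2)

def Spec_computeDilation5x5CircularSE (pixel_array : List (List Int)) (image_width : Int) (image_height : Int) (out : List (List Int)) : Prop := out = computeDilation5x5CircularSE_alt pixel_array image_width image_height
instance (pixel_array : List (List Int)) (image_width : Int) (image_height : Int) (out : List (List Int)) : Decidable (Spec_computeDilation5x5CircularSE pixel_array image_width image_height out) := by unfold Spec_computeDilation5x5CircularSE; infer_instance

-- ===== CLAIM (what is proved, stated in full; the proofs are below) =====
def Claim_equal_computeDilation5x5CircularSE : Prop := ∀ (pixel_array : List (List Int)) (image_width : Int) (image_height : Int), Dom_computeDilation5x5CircularSE pixel_array image_width image_height → Pre_computeDilation5x5CircularSE pixel_array image_width image_height → Spec_computeDilation5x5CircularSE pixel_array image_width image_height (computeDilation5x5CircularSE pixel_array image_width image_height)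

-- ===== LEMMAS AND PROOFS =====

def pvGetE (G : List (List Int)) (r c : Nat) : Int := (G.getD r []).getD c 0


def pvSet2 (G : List (List Int)) (r c : Nat) (v : Int) : List (List Int) := G.set r ((G.getD r []).set c v)


theorem pv_getD_set_self {α : Type} (l : List α) (i : Nat) (v d : α) (h : i < l.length) :
    (l.set i v).getD i d = v := by
  rw [List.getD_eq_getElem?_getD, List.getElem?_set_self h]; rfl

theorem pv_getD_set_ne {α : Type} (l : List α) (i j : Nat) (v d : α) (h : i ≠ j) :
    (l.set i v).getD j d = l.getD j d := by
  simp [List.getD_eq_getElem?_getD, h]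

theorem pv_foldl_set {α : Type} (step : List α → Nat → List α) (f : Nat → α → α) (d : α)
    (hstep : ∀ (D : List α) (r : Nat), r < D.length → step D r = D.set r (f r (D.getD r d))) :
    ∀ (t : Nat) (xs : List α), t ≤ xs.length →
      (List.range t).foldl step xs = ((List.range t).map (fun r => f r (xs.getD r d))) ++ xs.drop t := by
  intro t
  induction t with
  | zero => simp
  | succ t ih =>
    intro xs ht
    rw [List.range_succ, List.foldl_append, List.foldl_cons, List.foldl_nil, ih xs (by omega)]
    have hpre : ((List.range t).map (fun r => f r (xs.getD r d))).length = t := by simp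
    have hlen : ((List.range t).map (fun r => f r (xs.getD r d)) ++ xs.drop t).length = xs.length := by
      simp; omega
    rw [hstep _ t (by omega)]
    have hdrop : xs.drop t = xs[t] :: xs.drop (t + 1) := List.drop_eq_getElem_cons (by omega)
    rw [hdrop]
    rw [List.getD_append_right _ _ _ t (by omega), hpre]
    simp only [Nat.sub_self, List.getD_cons_zero]
    rw [List.set_append]
    simp only [hpre, lt_self_iff_false, if_false, Nat.sub_self, List.set_cons_zero]
    rw [List.map_append, List.append_assoc, List.map_singleton, List.singleton_append]
    simp [List.getD_eq_getElem?_getD, List.getElem?_eq_getElem (show t < xs.length by omega)]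
    rfl

theorem pv_foldl_row (cs : List Nat) (v : Nat → Int) :
    ∀ (D : List (List Int)) (r : Nat), r < D.length →
      cs.foldl (fun D c => D.set r ((D.getD r []).set c (v c))) D
        = D.set r (cs.foldl (fun row c => row.set c (v c)) (D.getD r [])) := by
  induction cs with
  | nil =>
    intro D r hr
    simp [List.getD_eq_getElem?_getD, List.getElem?_eq_getElem hr, List.set_getElem_self]
  | cons c cs ih =>
    intro D r hr
    rw [List.foldl_cons, List.foldl_cons, ih _ r (by simp [hr])]
    rw [List.set_set]
    congr 1
    simp [List.getD_eq_getElem?_getD, List.getElem?_set_self hr]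

theorem pv_foldl_if255 {ι : Type} (p : ι → Prop) [DecidablePred p] :
    ∀ (ws : List ι) (a : Int),
      ws.foldl (fun v w => if p w then 255 else v) a = if ∃ w ∈ ws, p w then 255 else a := by
  intro ws
  induction ws with
  | nil => simp
  | cons w ws ih =>
    intro a
    rw [List.foldl_cons, ih]
    by_cases h : p w <;> by_cases h2 : ∃ x ∈ ws, p x <;> simp [h, h2]

theorem pv_foldl_if255b {ι : Type} (p : ι → Bool) :
    ∀ (ws : List ι) (a : Int),
      ws.foldl (fun v w => if p w then 255 else v) a = if ws.any p then 255 else a := by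
  intro ws
  induction ws with
  | nil => simp
  | cons w ws ih =>
    intro a
    rw [List.foldl_cons, ih]
    by_cases h : p w = true <;> by_cases h2 : ws.any p = true <;> simp [h, h2]

theorem pv_foldl_shape {ι : Type} (step : List (List Int) → ι → List (List Int))
    (hstep : ∀ D w, (step D w).length = D.length ∧ ∀ r, ((step D w).getD r []).length = (D.getD r []).length) :
    ∀ (ws : List ι) (D : List (List Int)),
      (ws.foldl step D).length = D.length ∧ ∀ r, ((ws.foldl step D).getD r []).length = (D.getD r []).length := by
  intro ws
  induction ws with
  | nil => simp
  | cons w ws ih =>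
    intro D
    refine ⟨?_, fun r => ?_⟩
    · rw [List.foldl_cons, (ih _).1, (hstep D w).1]
    · rw [List.foldl_cons, (ih _).2 r, (hstep D w).2 r]

theorem pv_foldl_write {ι : Type} (step : List (List Int) → ι → List (List Int)) (hit : ι → Bool)
    (r c : Nat)
    (hshape : ∀ D w, (step D w).length = D.length ∧ ∀ r', ((step D w).getD r' []).length = (D.getD r' []).length)
    (hstep : ∀ D w, r < D.length → c < (D.getD r []).length →
       pvGetE (step D w) r c = if hit w then 255 else pvGetE D r c) :
    ∀ (ws : List ι) (D : List (List Int)), r < D.length → c < (D.getD r []).length →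
      pvGetE (ws.foldl step D) r c = if ws.any hit then 255 else pvGetE D r c := by
  intro ws
  induction ws with
  | nil => simp
  | cons w ws ih =>
    intro D hr hc
    rw [List.foldl_cons, ih _ (by rw [(hshape D w).1]; exact hr) (by rw [(hshape D w).2 r]; exact hc),
        hstep D w hr hc, List.any_cons]
    by_cases h : hit w = true <;> by_cases h2 : ws.any hit = true <;> simp [h, h2]

theorem pvSet2_shape (D : List (List Int)) (rt ct : Nat) (v : Int) :
    (pvSet2 D rt ct v).length = D.length ∧ ∀ r, ((pvSet2 D rt ct v).getD r []).length = (D.getD r []).length := by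
  refine ⟨by simp [pvSet2], fun r => ?_⟩
  by_cases hrt : rt = r
  · subst hrt
    by_cases h : rt < D.length
    · rw [pvSet2, pv_getD_set_self _ _ _ _ h, List.length_set]
    · rw [pvSet2, List.set_eq_of_length_le (by omega)]
  · rw [pvSet2, pv_getD_set_ne _ _ _ _ _ hrt]

theorem pvGetE_pvSet2 (D : List (List Int)) (rt ct r c : Nat) (v : Int)
    (hr : r < D.length) (hc : c < (D.getD r []).length) :
    pvGetE (pvSet2 D rt ct v) r c = if rt = r ∧ ct = c then v else pvGetE D r c := by
  by_cases hrt : rt = r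
  · subst hrt
    unfold pvGetE
    rw [pvSet2, pv_getD_set_self _ _ _ _ hr]
    by_cases hct : ct = c
    · subst hct
      rw [pv_getD_set_self _ _ _ _ hc]
      simp
    · rw [pv_getD_set_ne _ _ _ _ _ hct]
      simp [hct]
  · unfold pvGetE
    rw [pvSet2, pv_getD_set_ne _ _ _ _ _ hrt]
    simp [hrt]

theorem pv_map_getD_range {α β : Type} (xs : List α) (d : α) (f : α → β) :
    (List.range xs.length).map (fun r => f (xs.getD r d)) = xs.map f := by
  apply List.ext_getElem (by simp)
  intro i h1 h2
  simp [List.getD_eq_getElem?_getD, List.getElem?_eq_getElem (by simpa using h2)]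

def pvPadRow (row : List Int) : List Int := 0 :: 0 :: (row ++ [0, 0])

def pvP (pa : List (List Int)) (w : Int) : List (List Int) :=
  pvZeroRow w :: pvZeroRow w :: (pa.map pvPadRow ++ [pvZeroRow w, pvZeroRow w])

theorem pv_zeroRow_getD (w : Int) (t : Nat) : (pvZeroRow w).getD t 0 = 0 := by
  unfold pvZeroRow
  rw [List.getD_eq_getElem?_getD, List.getElem?_replicate]
  split <;> rfl

theorem pv_pad_getD_pos (row : List Int) (t : Nat) (h : 0 < (pvPadRow row).getD t 0) :
    2 ≤ t ∧ t < row.length + 2 := by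
  unfold pvPadRow at h
  match t with
  | 0 => simp at h
  | 1 => simp at h
  | (t + 2) =>
    simp only [List.getD_cons_succ] at h
    by_cases ht : t < row.length
    · exact ⟨by omega, by omega⟩
    · rw [List.getD_append_right _ _ _ t (by omega)] at h
      rcases hk : t - row.length with _ | _ | k <;> rw [hk] at h <;> simp at h

theorem pv_P_interior (pa : List (List Int)) (w : Int) (m : Nat)
    (hrows : ∀ row ∈ pa, row.length = m) (i j : Int) (hi : 0 ≤ i) (hj : 0 ≤ j)
    (h : 0 < PySem.List.pyGetD (PySem.List.pyGetD (pvP pa w) i []) j 0) :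
    2 ≤ i ∧ i < (pa.length : Int) + 2 ∧ 2 ≤ j ∧ j < (m : Int) + 2 := by
  rw [PySem.List.pyGetD_of_nonneg _ _ hi, PySem.List.pyGetD_of_nonneg _ _ hj] at h
  have hi' : i = (i.toNat : Int) := by omega
  have hj' : j = (j.toNat : Int) := by omega
  unfold pvP at h
  match hI : i.toNat with
  | 0 => rw [hI, List.getD_cons_zero, pv_zeroRow_getD] at h; omega
  | 1 => rw [hI, List.getD_cons_succ, List.getD_cons_zero, pv_zeroRow_getD] at h; omega
  | (I + 2) =>
    rw [hI] at h
    simp only [List.getD_cons_succ] at h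
    by_cases hIlen : I < pa.length
    · rw [List.getD_append _ _ _ I (by simpa using hIlen)] at h
      have hget : (pa.map pvPadRow).getD I [] = pvPadRow pa[I] := by
        rw [List.getD_eq_getElem?_getD, List.getElem?_map,
            List.getElem?_eq_getElem hIlen]
        rfl
      rw [hget] at h
      have hlen : pa[I].length = m := hrows _ (List.getElem_mem hIlen)
      have := pv_pad_getD_pos _ _ h
      rw [hlen] at this
      omega
    · rw [List.getD_append_right _ _ _ I (by simpa using hIlen)] at h
      simp only [List.length_map] at h
      rcases hk : I - pa.length with _ | _ | k <;> rw [hk] at h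
      · rw [List.getD_cons_zero, pv_zeroRow_getD] at h; omega
      · rw [List.getD_cons_succ, List.getD_cons_zero, pv_zeroRow_getD] at h; omega
      · simp at h

theorem pv_kernel_iff (k l : Int) (hk1 : -2 ≤ k) (hk2 : k < 3) (hl1 : -2 ≤ l) (hl2 : l < 3) :
    PySem.List.pyGetD (PySem.List.pyGetD pvKernel (k + 2) []) (l + 2) 0 = 1 ↔ (k, l) ∈ pvOffsets := by
  interval_cases k <;> interval_cases l <;> decide

theorem pv_initA (w : Int) (m n : Nat) (hw : w = (m : Int)) :
    (PySem.List.pyRange 0 (n : Int) 1).foldl (fun acc _ =>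
        acc ++ [(PySem.List.pyRange 0 w 1).foldl (fun row _ => row ++ [(0 : Int)]) []]) []
      = List.replicate n (List.replicate m 0) := by
  subst hw
  rw [PySem.List.foldl_append_singleton_eq_map
        (fun _ => (PySem.List.pyRange 0 (m : Int) 1).foldl (fun row _ => row ++ [(0 : Int)]) [])]
  rw [PySem.List.foldl_append_singleton_eq_map (fun _ => (0 : Int))]
  simp [List.map_const', PySem.List.length_pyRange_one]

theorem pvPad_eq (pa : List (List Int)) (w : Int) :
    pvPad pa w (pa.length : Int) = pvP pa w := by
  unfold pvPad pvP
  simp only [PySem.List.insert_zero, PySem.List.pyRange_one, List.foldl_map, zero_add, sub_zero,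
    Int.toNat_natCast, PySem.List.pySetD_natCast, PySem.List.pyGetD_natCast]
  rw [pv_foldl_set _ (fun _ row => pvPadRow row) [] ?hs pa.length pa (le_refl _)]
  case hs =>
    intro D r hr
    simp [hr, pvPadRow]
  rw [pv_map_getD_range]
  simp

def pvHitA (P : List (List Int)) (i j : Int) : Bool :=
  (PySem.List.pyRange (-2) 3 1).any fun k => (PySem.List.pyRange (-2) 3 1).any fun l =>
    decide (0 < PySem.List.pyGetD (PySem.List.pyGetD P (i + k) []) (j + l) 0) &&
    decide (PySem.List.pyGetD (PySem.List.pyGetD pvKernel (k + 2) []) (l + 2) 0 = 1)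

theorem pvA_char (pa : List (List Int)) (w : Int) (m : Nat) (hw : w = (m : Int)) :
    computeDilation5x5CircularSE pa w (pa.length : Int) =
      (List.range pa.length).map (fun (r : Nat) => (List.range m).map (fun (c : Nat) =>
        if pvHitA (pvP pa w) (2 + (r : Int)) (2 + (c : Int)) then (255 : Int) else 0)) := by
  subst hw
  unfold computeDilation5x5CircularSE
  rw [pv_initA _ m pa.length rfl, pvPad_eq]
  rw [PySem.List.pyRange_one 2 ((pa.length : Int) + 2), PySem.List.pyRange_one 2 ((m : Int) + 2)]
  simp only [List.foldl_map, add_sub_cancel_right, Int.toNat_natCast,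
    show ∀ t : Nat, 2 + (t : Int) - 2 = (t : Int) from fun t => by ring,
    PySem.List.pySetD_natCast, PySem.List.pyGetD_natCast]
  rw [pv_foldl_set _ (fun r row => (List.range m).foldl (fun row c => row.set c
        ((PySem.List.pyRange (-2) 3 1).foldl (fun v k =>
          (PySem.List.pyRange (-2) 3 1).foldl (fun v l =>
            if 0 < PySem.List.pyGetD (PySem.List.pyGetD (pvP pa ((m : Int))) ((2 + (r : Int)) + k) []) ((2 + (c : Int)) + l) 0 ∧
               PySem.List.pyGetD (PySem.List.pyGetD pvKernel (k + 2) []) (l + 2) 0 = 1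
            then 255 else v) v) 0)) row) [] ?hsA pa.length _ (by simp)]
  case hsA =>
    intro D r hr
    rw [pv_foldl_row]
    exact hr
  rw [List.drop_replicate]
  simp only [Nat.sub_self, List.replicate_zero, List.append_nil]
  apply List.map_congr_left
  intro r hr
  rw [List.mem_range] at hr
  rw [List.getD_replicate _ hr]
  rw [pv_foldl_set _ (fun c _ => ((PySem.List.pyRange (-2) 3 1).foldl (fun v k =>
          (PySem.List.pyRange (-2) 3 1).foldl (fun v l =>
            if 0 < PySem.List.pyGetD (PySem.List.pyGetD (pvP pa ((m : Int))) ((2 + (r : Int)) + k) []) ((2 + (c : Int)) + l) 0 ∧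
               PySem.List.pyGetD (PySem.List.pyGetD pvKernel (k + 2) []) (l + 2) 0 = 1
            then 255 else v) v) 0)) 0 (fun row c hc => rfl) m _ (by simp)]
  rw [List.drop_replicate]
  simp only [Nat.sub_self, List.replicate_zero, List.append_nil]
  apply List.map_congr_left
  intro c hc
  have hin : ∀ (k v : Int), (PySem.List.pyRange (-2) 3 1).foldl (fun v l =>
        if 0 < PySem.List.pyGetD (PySem.List.pyGetD (pvP pa ((m : Int))) ((2 + (r : Int)) + k) []) ((2 + (c : Int)) + l) 0 ∧
           PySem.List.pyGetD (PySem.List.pyGetD pvKernel (k + 2) []) (l + 2) 0 = 1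
        then 255 else v) v
      = if ((PySem.List.pyRange (-2) 3 1).any fun l =>
            decide (0 < PySem.List.pyGetD (PySem.List.pyGetD (pvP pa ((m : Int))) ((2 + (r : Int)) + k) []) ((2 + (c : Int)) + l) 0) &&
            decide (PySem.List.pyGetD (PySem.List.pyGetD pvKernel (k + 2) []) (l + 2) 0 = 1)) then 255 else v := by
    intro k v
    rw [pv_foldl_if255]
    exact if_congr (by simp) rfl rfl
  simp only [hin]
  rw [pv_foldl_if255b]
  rfl

theorem pv_shapeO (n w : Int) (p q : Int) : ∀ (D : List (List Int)) (o : Int × Int),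
    ((if 0 ≤ p - o.1 - 2 ∧ p - o.1 - 2 < n ∧ 0 ≤ q - o.2 - 2 ∧ q - o.2 - 2 < w then
        PySem.List.pySetD D (p - o.1 - 2)
          (PySem.List.pySetD (PySem.List.pyGetD D (p - o.1 - 2) []) (q - o.2 - 2) 255)
      else D).length = D.length) ∧
    ∀ r', (((if 0 ≤ p - o.1 - 2 ∧ p - o.1 - 2 < n ∧ 0 ≤ q - o.2 - 2 ∧ q - o.2 - 2 < w then
        PySem.List.pySetD D (p - o.1 - 2)
          (PySem.List.pySetD (PySem.List.pyGetD D (p - o.1 - 2) []) (q - o.2 - 2) 255)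
      else D).getD r' []).length = ((D.getD r' []).length)) := by
  intro D o
  by_cases hg : 0 ≤ p - o.1 - 2 ∧ p - o.1 - 2 < n ∧ 0 ≤ q - o.2 - 2 ∧ q - o.2 - 2 < w
  · rw [if_pos hg, PySem.List.pySetD_of_nonneg _ _ hg.1, PySem.List.pyGetD_of_nonneg _ _ hg.1,
        PySem.List.pySetD_of_nonneg _ _ hg.2.2.1]
    exact pvSet2_shape D _ _ 255
  · rw [if_neg hg]; exact ⟨rfl, fun _ => rfl⟩

theorem pv_shapeQ (P : List (List Int)) (n w : Int) (p : Int) : ∀ (D : List (List Int)) (q : Int),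
    ((if 0 < PySem.List.pyGetD (PySem.List.pyGetD P p []) q 0 then
        pvOffsets.foldl (fun D o =>
          if 0 ≤ p - o.1 - 2 ∧ p - o.1 - 2 < n ∧ 0 ≤ q - o.2 - 2 ∧ q - o.2 - 2 < w then
            PySem.List.pySetD D (p - o.1 - 2)
              (PySem.List.pySetD (PySem.List.pyGetD D (p - o.1 - 2) []) (q - o.2 - 2) 255)
          else D) D
      else D).length = D.length) ∧
    ∀ r', (((if 0 < PySem.List.pyGetD (PySem.List.pyGetD P p []) q 0 then
        pvOffsets.foldl (fun D o =>
          if 0 ≤ p - o.1 - 2 ∧ p - o.1 - 2 < n ∧ 0 ≤ q - o.2 - 2 ∧ q - o.2 - 2 < w then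
            PySem.List.pySetD D (p - o.1 - 2)
              (PySem.List.pySetD (PySem.List.pyGetD D (p - o.1 - 2) []) (q - o.2 - 2) 255)
          else D) D
      else D).getD r' []).length = ((D.getD r' []).length)) := by
  intro D q
  by_cases hfg : 0 < PySem.List.pyGetD (PySem.List.pyGetD P p []) q 0
  · rw [if_pos hfg]; exact pv_foldl_shape _ (pv_shapeO n w p q) pvOffsets D
  · rw [if_neg hfg]; exact ⟨rfl, fun _ => rfl⟩


def pvHitB (P : List (List Int)) (h w : Int) (r c : Nat) : Bool :=
  (PySem.List.pyRange 2 (h + 2) 1).any fun p => (PySem.List.pyRange 2 (w + 2) 1).any fun q =>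
    decide (0 < PySem.List.pyGetD (PySem.List.pyGetD P p []) q 0) &&
    (pvOffsets.any fun o =>
      decide (0 ≤ p - o.1 - 2 ∧ p - o.1 - 2 < h ∧ 0 ≤ q - o.2 - 2 ∧ q - o.2 - 2 < w) &&
      decide (p - o.1 - 2 = (r : Int)) && decide (q - o.2 - 2 = (c : Int)))

theorem pvB_char (pa : List (List Int)) (w : Int) (m : Nat) (hw : w = (m : Int)) (r c : Nat)
    (hr : r < pa.length) (hc : c < m) :
    pvGetE (computeDilation5x5CircularSE_alt pa w (pa.length : Int)) r c =
      if pvHitB (pvP pa w) (pa.length : Int) w r c then 255 else 0 := by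
  subst hw
  unfold computeDilation5x5CircularSE_alt
  rw [pvPad_eq]
  have hinit : (PySem.List.pyRange 0 ((pa.length : Int)) 1).map (fun _ => List.replicate ((m : Int)).toNat (0 : Int))
      = List.replicate pa.length (List.replicate m 0) := by
    simp [List.map_const', PySem.List.length_pyRange_one]
  rw [hinit]
  have hshapeO := pv_shapeO (pa.length : Int) ((m : Int))
  have hstepO : ∀ (p q : Int) (D : List (List Int)) (o : Int × Int),
      r < D.length → c < (D.getD r []).length →
      pvGetE (if 0 ≤ p - o.1 - 2 ∧ p - o.1 - 2 < (pa.length : Int) ∧ 0 ≤ q - o.2 - 2 ∧ q - o.2 - 2 < (m : Int) then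
          PySem.List.pySetD D (p - o.1 - 2)
            (PySem.List.pySetD (PySem.List.pyGetD D (p - o.1 - 2) []) (q - o.2 - 2) 255)
        else D) r c
      = if (decide (0 ≤ p - o.1 - 2 ∧ p - o.1 - 2 < (pa.length : Int) ∧ 0 ≤ q - o.2 - 2 ∧ q - o.2 - 2 < (m : Int)) &&
            decide (p - o.1 - 2 = (r : Int)) && decide (q - o.2 - 2 = (c : Int)))
        then 255 else pvGetE D r c := by
    intro p q D o hr' hc'
    by_cases hg : 0 ≤ p - o.1 - 2 ∧ p - o.1 - 2 < (pa.length : Int) ∧ 0 ≤ q - o.2 - 2 ∧ q - o.2 - 2 < (m : Int)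
    · rw [if_pos hg, PySem.List.pySetD_of_nonneg _ _ hg.1, PySem.List.pyGetD_of_nonneg _ _ hg.1,
          PySem.List.pySetD_of_nonneg _ _ hg.2.2.1,
          show D.set (p - o.1 - 2).toNat ((D.getD (p - o.1 - 2).toNat []).set (q - o.2 - 2).toNat 255)
            = pvSet2 D (p - o.1 - 2).toNat (q - o.2 - 2).toNat 255 from rfl,
          pvGetE_pvSet2 _ _ _ _ _ _ hr' hc']
      have hiff : ((p - o.1 - 2).toNat = r ∧ (q - o.2 - 2).toNat = c) ↔
          (p - o.1 - 2 = (r : Int) ∧ q - o.2 - 2 = (c : Int)) := by omega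
      simp only [hiff, Bool.and_eq_true, decide_eq_true_eq]
      split_ifs with h1 h2 <;> first | rfl | (exfalso; omega)
    · rw [if_neg hg]
      simp only [decide_eq_true_eq, Bool.and_eq_true]
      rw [if_neg (by omega)]
  rw [pv_foldl_write _
      (fun p => (PySem.List.pyRange 2 ((m : Int) + 2) 1).any fun q =>
        decide (0 < PySem.List.pyGetD (PySem.List.pyGetD (pvP pa ((m : Int))) p []) q 0) &&
        (pvOffsets.any fun o =>
          decide (0 ≤ p - o.1 - 2 ∧ p - o.1 - 2 < (pa.length : Int) ∧ 0 ≤ q - o.2 - 2 ∧ q - o.2 - 2 < (m : Int)) &&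
          decide (p - o.1 - 2 = (r : Int)) && decide (q - o.2 - 2 = (c : Int)))) r c
      ?shapeP ?stepP _ _ (by simp [hr]) (by simp [hr, hc])]
  case shapeP =>
    intro D p
    exact pv_foldl_shape _ (pv_shapeQ (pvP pa ((m : Int))) (pa.length : Int) ((m : Int)) p) _ D
  case stepP =>
    intro D p hr' hc'
    rw [pv_foldl_write _
        (fun q => decide (0 < PySem.List.pyGetD (PySem.List.pyGetD (pvP pa ((m : Int))) p []) q 0) &&
          (pvOffsets.any fun o =>
            decide (0 ≤ p - o.1 - 2 ∧ p - o.1 - 2 < (pa.length : Int) ∧ 0 ≤ q - o.2 - 2 ∧ q - o.2 - 2 < (m : Int)) &&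
            decide (p - o.1 - 2 = (r : Int)) && decide (q - o.2 - 2 = (c : Int)))) r c
        ?shapeQ ?stepQ _ _ hr' hc']
    case shapeQ =>
      intro D q
      exact pv_shapeQ (pvP pa ((m : Int))) (pa.length : Int) ((m : Int)) p D q
    case stepQ =>
      intro D q hr2 hc2
      by_cases hfg : 0 < PySem.List.pyGetD (PySem.List.pyGetD (pvP pa ((m : Int))) p []) q 0
      · rw [if_pos hfg,
            pv_foldl_write _
              (fun o => decide (0 ≤ p - o.1 - 2 ∧ p - o.1 - 2 < (pa.length : Int) ∧ 0 ≤ q - o.2 - 2 ∧ q - o.2 - 2 < (m : Int)) &&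
                decide (p - o.1 - 2 = (r : Int)) && decide (q - o.2 - 2 = (c : Int))) r c
              (pv_shapeO (pa.length : Int) ((m : Int)) p q) (hstepO p q) _ _ hr2 hc2]
        simp only [decide_eq_true hfg, Bool.true_and]
      · rw [if_neg hfg]; simp [hfg]
  have h0 : pvGetE (List.replicate pa.length (List.replicate m (0 : Int))) r c = 0 := by
    simp [pvGetE, hr, hc]
  rw [h0]
  rfl

theorem pvB_shape (pa : List (List Int)) (w : Int) (m : Nat) (hw : w = (m : Int)) :
    (computeDilation5x5CircularSE_alt pa w (pa.length : Int)).length = pa.length ∧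
    ∀ r, ((computeDilation5x5CircularSE_alt pa w (pa.length : Int)).getD r []).length
        = ((List.replicate pa.length (List.replicate m (0 : Int))).getD r []).length := by
  subst hw
  simp only [computeDilation5x5CircularSE_alt]
  have hinit : (PySem.List.pyRange 0 ((pa.length : Int)) 1).map (fun _ => List.replicate ((m : Int)).toNat (0 : Int))
      = List.replicate pa.length (List.replicate m 0) := by
    simp [List.map_const', PySem.List.length_pyRange_one]
  rw [pvPad_eq, hinit]
  have h := pv_foldl_shape _
    (fun D p => pv_foldl_shape _ (pv_shapeQ (pvP pa ((m : Int))) (pa.length : Int) ((m : Int)) p)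
      (PySem.List.pyRange 2 ((m : Int) + 2) 1) D)
    (PySem.List.pyRange 2 ((pa.length : Int) + 2) 1) (List.replicate pa.length (List.replicate m 0))
  refine ⟨by rw [h.1]; simp, fun r => h.2 r⟩

theorem pv_off_mem : ∀ o ∈ pvOffsets, -2 ≤ o.1 ∧ o.1 < 3 ∧ -2 ≤ o.2 ∧ o.2 < 3 := by decide

theorem pvHit_iff (pa : List (List Int)) (w : Int) (m : Nat) (hw : w = (m : Int))
    (hrows : ∀ row ∈ pa, row.length = m) (r c : Nat) (hr : r < pa.length) (hc : c < m) :
    pvHitA (pvP pa w) (2 + (r : Int)) (2 + (c : Int)) = pvHitB (pvP pa w) (pa.length : Int) w r c := by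
  subst hw
  rw [Bool.eq_iff_iff]
  simp only [pvHitA, pvHitB, List.any_eq_true, Bool.and_eq_true, decide_eq_true_eq]
  constructor
  · rintro ⟨k, hk, l, hl, hfg, hker⟩
    rw [PySem.List.mem_pyRange_one] at hk hl
    have hint := pv_P_interior pa ((m : Int)) m hrows (2 + (r : Int) + k) (2 + (c : Int) + l)
      (by omega) (by omega) hfg
    exact ⟨2 + (r : Int) + k, by rw [PySem.List.mem_pyRange_one]; omega,
      2 + (c : Int) + l, by rw [PySem.List.mem_pyRange_one]; omega, hfg,
      (k, l), (pv_kernel_iff k l hk.1 hk.2 hl.1 hl.2).mp hker,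
      ⟨⟨by omega, by omega, by omega, by omega⟩, by omega⟩, by omega⟩
  · rintro ⟨p, hp, q, hq, hfg, o, ho, ⟨⟨hg1, hg2, hg3, hg4⟩, he1⟩, he2⟩
    obtain ⟨hb1, hb2, hb3, hb4⟩ := pv_off_mem o ho
    have hp' : 2 + (r : Int) + o.1 = p := by omega
    have hq' : 2 + (c : Int) + o.2 = q := by omega
    refine ⟨o.1, by rw [PySem.List.mem_pyRange_one]; exact ⟨hb1, hb2⟩,
      o.2, by rw [PySem.List.mem_pyRange_one]; exact ⟨hb3, hb4⟩, ?_, ?_⟩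
    · rw [hp', hq']; exact hfg
    · exact (pv_kernel_iff o.1 o.2 hb1 hb2 hb3 hb4).mpr (by simpa using ho)

theorem pv_main (pa : List (List Int)) (w : Int) (hrows : ∀ row ∈ pa, (row.length : Int) = w) :
    computeDilation5x5CircularSE pa w (pa.length : Int) = computeDilation5x5CircularSE_alt pa w (pa.length : Int) := by
  match pa with
  | [] =>
    simp [computeDilation5x5CircularSE, computeDilation5x5CircularSE_alt,
      PySem.List.pyRange_one_eq_nil]
  | (row0 :: rest) =>
    set pa := row0 :: rest with hpa
    have hw : w = ((row0.length : Nat) : Int) := (hrows row0 (by simp [hpa])).symm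
    set m := row0.length with hm
    have hrows' : ∀ row ∈ pa, row.length = m := by
      intro row h
      have := hrows row h
      omega
    rw [pvA_char pa w m hw]
    have hshape := pvB_shape pa w m hw
    apply List.ext_getElem
    · simp [hshape.1]
    · intro i h1 h2
      have hi : i < pa.length := by simpa using h1
      apply List.ext_getElem
      · have e1 : (computeDilation5x5CircularSE_alt pa w ((pa.length : Int)))[i] =
            (computeDilation5x5CircularSE_alt pa w ((pa.length : Int))).getD i [] :=
          (List.getD_eq_getElem _ _ h2).symm
        rw [e1, hshape.2 i, List.getD_eq_getElem _ _ (by simpa using hi)]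
        simp
      · intro j hj1 hj2
        have hj : j < m := by simpa [hi] using hj1
        have hB := pvB_char pa w m hw i j hi hj
        unfold pvGetE at hB
        rw [List.getD_eq_getElem _ _ h2, List.getD_eq_getElem _ _ hj2] at hB
        simp only [List.getElem_map, List.getElem_range]
        rw [hB, pvHit_iff pa w m hw hrows' i j hi hj]

theorem pv_trivial (pa : List (List Int)) (w h : Int) (hh : h ≤ 0) :
    computeDilation5x5CircularSE pa w h = computeDilation5x5CircularSE_alt pa w h := by
  simp only [computeDilation5x5CircularSE, computeDilation5x5CircularSE_alt]
  rw [PySem.List.pyRange_one_eq_nil (show h ≤ 0 by omega),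
      PySem.List.pyRange_one_eq_nil (show h + 2 ≤ 2 by omega)]
  rfl

-- ===== VERDICT (by name: the statement is the Claim_ definition above) =====
theorem computeDilation5x5CircularSE_spec : Claim_equal_computeDilation5x5CircularSE := by
  intro pixel_array image_width image_height hdom hpre
  unfold Spec_computeDilation5x5CircularSE
  rcases hpre with hh | ⟨hh, hrows⟩
  · exact pv_trivial pixel_array image_width image_height hh
  · subst hh
    exact pv_main pixel_array image_width hrows
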